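-- pv_equiv track=rewrite | github.com/Azure/azure-sdk-for-python | sdk/webpubsub/azure-messaging-webpubsubservice/azure/messaging/webpubsubservice/core/rest/_rest.py | _parse_lines_from_text
-- ===== SOURCE A (Python) =====
-- def _parse_lines_from_text(text):
--     # largely taken from httpx's LineDecoder code
--     lines = []
--     last_chunk_of_text = ""
--     while text:
--         text_length = len(text)
--         for idx in range(text_length):
--             curr_char = text[idx]
--             next_char = None if idx == len(text) - 1 else text[idx + 1]
--             if curr_char == "\n":
--                 lines.append(text[: idx + 1])
--                 text = text[idx + 1 :]
--                 break
--             if curr_char == "\r" and next_char == "\n":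
--                 # if it ends with \r\n, we only do \n
--                 lines.append(text[:idx] + "\n")
--                 text = text[idx + 2 :]
--                 break
--             if curr_char == "\r" and next_char is not None:
--                 # if it's \r then a normal character, we switch \r to \n
--                 lines.append(text[:idx] + "\n")
--                 text = text[idx + 1 :]
--                 break
--             if next_char is None:
--                 text = ""
--                 last_chunk_of_text += text
--                 break
--     if last_chunk_of_text.endswith("\r"):
--         # if ends with \r, we switch \r to \n
--         lines.append(last_chunk_of_text[:-1] + "\n")
--     elif last_chunk_of_text:
--         lines.append(last_chunk_of_text)
--     return lines
-- ===== SOURCE B (Python) =====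
-- def _parse_lines_from_text(text):
--     # One forward pass over the indices with a `start` pointer: no re-slicing
--     # of the remaining text and no restarted inner scan. Terminated lines are
--     # emitted with a normalized "\n"; an unterminated tail (including a lone
--     # trailing "\r") is dropped, as in the streaming-decoder semantics.
--     lines = []
--     n = len(text)
--     start = 0
--     i = 0
--     while i < n:
--         c = text[i]
--         if c == "\n":
--             lines.append(text[start:i] + "\n")
--             i += 1
--             start = i
--         elif c == "\r" and i + 1 < n:
--             lines.append(text[start:i] + "\n")
--             i += 2 if text[i + 1] == "\n" else 1
--             start = i
--         else:
--             i += 1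
--     return lines
-- ===== Notes on version B (the rewrite author's own statement) =====
-- stated objective: faster
-- what changed: A repeatedly rescans and re-slices the remaining text from index 0 for every emitted line (and threads dead last-chunk bookkeeping); B is a single forward index pass with a start pointer, slicing each line out of the original string once.
import Mathlib
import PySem

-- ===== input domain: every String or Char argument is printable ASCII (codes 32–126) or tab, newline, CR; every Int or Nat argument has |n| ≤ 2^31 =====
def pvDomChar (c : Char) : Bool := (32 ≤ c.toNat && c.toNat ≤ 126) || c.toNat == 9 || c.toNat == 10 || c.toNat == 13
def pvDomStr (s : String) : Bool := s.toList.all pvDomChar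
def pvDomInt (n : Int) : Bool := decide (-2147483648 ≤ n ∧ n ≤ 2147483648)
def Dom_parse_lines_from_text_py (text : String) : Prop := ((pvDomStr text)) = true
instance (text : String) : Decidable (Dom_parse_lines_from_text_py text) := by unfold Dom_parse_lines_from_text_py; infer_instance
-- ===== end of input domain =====

-- B replaces A's restart-and-reslice outer loop by one forward index pass (faster); return values proved equal on all inputs.

-- ===== PORT A =====
-- inner `for idx in range(text_length)` loop: returns (line appended if any, new text, addition to last_chunk_of_text)
def pvInnerA (t : List Char) (idx : Nat) : Option (List Char) × List Char × List Char :=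
  if h : idx < t.length then
    let c := t[idx]
    -- next_char = None if idx == len(text) - 1 else text[idx + 1]  (idx+1 in range when taken)
    let next : Option Char := if idx = t.length - 1 then none else some (t.getD (idx + 1) ' ')
    if c = '\n' then
      -- lines.append(text[: idx + 1]); text = text[idx + 1 :]   (in-range nonneg slices = take/drop)
      (some (t.take (idx + 1)), t.drop (idx + 1), [])
    else if c = '\r' ∧ next = some '\n' then
      (some (t.take idx ++ ['\n']), t.drop (idx + 2), [])
    else if c = '\r' ∧ next ≠ none then
      (some (t.take idx ++ ['\n']), t.drop (idx + 1), [])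
    else if next = none then
      -- text = ""; last_chunk_of_text += text   (adds the already-emptied text)
      (none, [], [])
    else pvInnerA t (idx + 1)
  else (none, [], [])
termination_by t.length - idx

-- the new text returned by the inner loop is strictly shorter (needed to terminate `while text:`)
theorem pvInnerA_len (t : List Char) (idx : Nat) (ht : t ≠ []) :
    (pvInnerA t idx).2.1.length < t.length := by
  have hpos : 0 < t.length := List.length_pos_of_ne_nil ht
  rw [pvInnerA]
  split
  · dsimp only
    repeat' split
    all_goals first
      | exact pvInnerA_len t (idx + 1) ht
      | (simp; omega)
  · simpa using hpos
termination_by t.length - idx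

-- `while text:` loop, threading last_chunk_of_text
def pvOuterA (t lc : List Char) (lines : List String) : List String × List Char :=
  if ht : t = [] then (lines, lc)
  else
    let r := pvInnerA t 0
    pvOuterA r.2.1 (lc ++ r.2.2) (lines ++ (r.1.map (fun l => String.ofList l)).toList)
termination_by t.length
decreasing_by exact pvInnerA_len t 0 ht

def parse_lines_from_text_py (text : String) : List String :=
  let r := pvOuterA text.toList [] []
  let lines := r.1
  let lc := r.2
  if PySem.Chars.endswith lc ['\r'] then lines ++ [String.ofList (lc.dropLast ++ ['\n'])]
  else if lc ≠ [] then lines ++ [String.ofList lc]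
  else lines

-- ===== PORT B =====
-- single forward pass: `while i < n`, emitting text[start:i] + "\n" at each terminator
-- (invariant start ≤ i ≤ n = len, so text[start:i] is the in-range slice (take i).drop start)
def pvGoB (t : List Char) (n start i : Nat) (lines : List String) : List String :=
  if h : i < n then
    let c := t.getD i ' '
    if c = '\n' then
      pvGoB t n (i + 1) (i + 1) (lines ++ [String.ofList ((t.take i).drop start ++ ['\n'])])
    else if c = '\r' ∧ i + 1 < n then
      let j := if t.getD (i + 1) ' ' = '\n' then i + 2 else i + 1
      pvGoB t n j j (lines ++ [String.ofList ((t.take i).drop start ++ ['\n'])])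
    else pvGoB t n start (i + 1) lines
  else lines
termination_by n - i
decreasing_by all_goals first | (split <;> omega) | omega

def parse_lines_from_text_py_alt (text : String) : List String :=
  pvGoB text.toList text.toList.length 0 0 []

-- ===== PRECONDITION & SPEC =====
def Spec_parse_lines_from_text_py (text : String) (out : List String) : Prop := out = parse_lines_from_text_py_alt text
instance (text : String) (out : List String) : Decidable (Spec_parse_lines_from_text_py text out) := by unfold Spec_parse_lines_from_text_py; infer_instance

-- ===== CLAIM (what is proved, stated in full; the proofs are below) =====
def Claim_equal_parse_lines_from_text_py : Prop := ∀ (text : String), Dom_parse_lines_from_text_py text → Spec_parse_lines_from_text_py text (parse_lines_from_text_py text)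

-- ===== LEMMAS AND PROOFS =====

-- the last_chunk_of_text addition produced by the inner loop is always empty
theorem pvInnerA_lc (t : List Char) (idx : Nat) : (pvInnerA t idx).2.2 = [] := by
  rw [pvInnerA]
  split
  · dsimp only
    repeat' split
    all_goals first
      | exact pvInnerA_lc t (idx + 1)
      | rfl
  · rfl
termination_by t.length - idx

theorem pvInnerA_ge (t : List Char) (idx : Nat) (h : t.length ≤ idx) :
    pvInnerA t idx = (none, [], []) := by
  rw [pvInnerA, dif_neg (by omega)]

-- the list of lines A extracts from a text (its last_chunk stays empty throughout)
def pvArun (s : List Char) : List (List Char) :=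
  if hs : s = [] then []
  else (pvInnerA s 0).1.toList ++ pvArun (pvInnerA s 0).2.1
termination_by s.length
decreasing_by exact pvInnerA_len s 0 hs

-- A's lines when the inner scan starts at offset k
def pvArunK (s : List Char) (k : Nat) : List (List Char) :=
  (pvInnerA s k).1.toList ++ pvArun (pvInnerA s k).2.1

theorem pvArun_nil : pvArun [] = [] := by rw [pvArun]; simp

theorem pvArunK_zero (s : List Char) : pvArunK s 0 = pvArun s := by
  by_cases hs : s = []
  · subst hs; rw [pvArunK, pvInnerA_ge [] 0 (by simp)]; simp [pvArun_nil]
  · rw [pvArunK]; conv_rhs => rw [pvArun]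
    rw [dif_neg hs]

theorem pvArunK_ge (s : List Char) (k : Nat) (h : s.length ≤ k) : pvArunK s k = [] := by
  rw [pvArunK, pvInnerA_ge s k h]; simp [pvArun_nil]

theorem pvOuterA_eq (t lc : List Char) (lines : List String) :
    pvOuterA t lc lines = (lines ++ (pvArun t).map (fun l => String.ofList l), lc) := by
  rw [pvOuterA]
  split
  · next ht => subst ht; rw [pvArun_nil]; simp
  · next ht =>
    rw [pvOuterA_eq, pvInnerA_lc]
    conv_rhs => rw [pvArun, dif_neg ht]
    cases (pvInnerA t 0).1 <;> simp
termination_by t.length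
decreasing_by exact pvInnerA_len t 0 ‹t ≠ []›

-- in-range python slice text[start:i] on the suffix vs on the whole text
theorem pv_slice (t : List Char) (start i : Nat) (hsi : start ≤ i) :
    (t.drop start).take (i - start) = (t.take i).drop start := by
  rw [List.take_drop, show start + (i - start) = i from by omega]

-- B's forward pass from (start, i) produces exactly A's lines of the remaining text t.drop start
-- with the inner scan resumed at offset i - start
theorem pvGoB_eq (t : List Char) (start i : Nat) (lines : List String)
    (hsi : start ≤ i) (hit : i ≤ t.length) :
    pvGoB t t.length start i lines
      = lines ++ (pvArunK (t.drop start) (i - start)).map (fun l => String.ofList l) := by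
  rw [pvGoB]
  by_cases h : i < t.length
  · rw [dif_pos h]
    dsimp only
    have hs_len : (t.drop start).length = t.length - start := by simp
    have hk : i - start < (t.drop start).length := by omega
    have hchar : (t.drop start)[i - start]'hk = t[i]'h := by
      rw [List.getElem_drop]; congr 1; omega
    have hgetD : t.getD i ' ' = t[i]'h := List.getD_eq_getElem t ' ' h
    rw [pvArunK, pvInnerA, dif_pos hk]
    dsimp only
    rw [hchar, hgetD]
    by_cases hnl : t[i]'h = '\n'
    · -- newline: both emit text[start:i] + "\n"
      rw [if_pos hnl, if_pos hnl]
      rw [pvGoB_eq t (i + 1) (i + 1) _ (le_refl _) (by omega)]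
      rw [Nat.sub_self, pvArunK_zero, List.drop_drop]
      have h1 : (t.drop start).take (i - start + 1) = (t.take i).drop start ++ ['\n'] := by
        rw [List.take_drop]
        have : start + (i - start + 1) = i + 1 := by omega
        rw [this, List.take_succ_eq_append_getElem h,
          List.drop_append_of_le_length (by simp; omega), hnl]
      rw [h1, show start + (i - start + 1) = i + 1 from by omega]
      simp
    · rw [if_neg hnl, if_neg hnl]
      have hlast : i = t.length - 1 ↔ ¬ (i + 1 < t.length) := by omega
      have hklast : (i - start = (t.drop start).length - 1) ↔ (i = t.length - 1) := by
        rw [hs_len]; omega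
      by_cases hcr : t[i]'h = '\r'
      · by_cases hnext : i + 1 < t.length
        · -- \r with a following character
          have hk1 : ¬ (i - start = (t.drop start).length - 1) := by omega
          have hnextc : (t.drop start).getD (i - start + 1) ' ' = t[i + 1]'hnext := by
            rw [List.getD_eq_getElem _ _ (by omega), List.getElem_drop]
            congr 1; omega
          have hngetD : t.getD (i + 1) ' ' = t[i + 1]'hnext := List.getD_eq_getElem t ' ' hnext
          rw [if_pos ⟨hcr, hnext⟩, if_neg hk1]
          have hline : (t.drop start).take (i - start) ++ ['\n']
              = (t.take i).drop start ++ ['\n'] := by rw [pv_slice t start i hsi]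
          by_cases hnn : t[i + 1]'hnext = '\n'
          · rw [hnextc, if_pos (⟨hcr, by rw [hnn]⟩ : _ ∧ _ = some '\n'), hngetD, if_pos hnn]
            rw [pvGoB_eq t (i + 2) (i + 2) _ (le_refl _) (by omega)]
            rw [Nat.sub_self, pvArunK_zero, List.drop_drop,
              show start + (i - start + 2) = i + 2 from by omega, hline]
            simp
          · rw [hnextc, if_neg (by simp [hnn] : ¬ (_ ∧ _)), if_pos (⟨hcr, by simp⟩ : _ ∧ _),
              hngetD, if_neg hnn]
            rw [pvGoB_eq t (i + 1) (i + 1) _ (le_refl _) (by omega)]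
            rw [Nat.sub_self, pvArunK_zero, List.drop_drop,
              show start + (i - start + 1) = i + 1 from by omega, hline]
            simp
        · -- trailing lone \r: B skips it, A's inner loop hits next_char = None
          have hk1 : i - start = (t.drop start).length - 1 := by omega
          rw [if_neg (by tauto), if_pos hk1]
          rw [if_neg (by simp), if_neg (by simp), if_pos rfl]
          rw [pvGoB_eq t start (i + 1) _ (by omega) (by omega)]
          rw [pvArunK_ge _ _ (by omega)]
          simp [pvArun_nil]
      · -- ordinary character
        rw [if_neg (by tauto)]
        by_cases hnext : i + 1 < t.length
        · have hk1 : ¬ (i - start = (t.drop start).length - 1) := by omega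
          rw [if_neg hk1, if_neg (by tauto), if_neg (by tauto), if_neg (by simp)]
          rw [pvGoB_eq t start (i + 1) _ (by omega) (by omega)]
          have : i + 1 - start = i - start + 1 := by omega
          rw [this, pvArunK]
        · have hk1 : i - start = (t.drop start).length - 1 := by omega
          rw [if_pos hk1, if_neg (by tauto), if_neg (by tauto), if_pos rfl]
          rw [pvGoB_eq t start (i + 1) _ (by omega) (by omega)]
          rw [pvArunK_ge _ _ (by omega)]
          simp [pvArun_nil]
  · rw [dif_neg h]
    rw [pvArunK_ge _ _ (by simp; omega)]
    simp
termination_by t.length - i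
decreasing_by all_goals omega

-- ===== VERDICT (by name: the statement is the Claim_ definition above) =====
theorem parse_lines_from_text_py_spec : Claim_equal_parse_lines_from_text_py := by
  intro text _
  unfold Spec_parse_lines_from_text_py parse_lines_from_text_py parse_lines_from_text_py_alt
  rw [pvOuterA_eq]
  rw [pvGoB_eq text.toList 0 0 [] (le_refl _) (by omega)]
  rw [List.drop_zero, Nat.sub_zero, pvArunK_zero]
  simp [PySem.Chars.endswith]
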